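-- pv_equiv track=rewrite | github.com/xqi1337/viu | fastanime/libs/provider/scraping/utils.py | encode_base_n
-- ===== SOURCE A (Python) =====
-- import string
-- from typing import Optional
--
-- def encode_base_n(num: int, n: int, table: Optional[str] = None) -> str:
--     """
--     Encode a number in base-n representation.
--
--     Args:
--         num: The number to encode
--         n: The base to use for encoding
--         table: Custom character table (optional)
--
--     Returns:
--         String representation of the number in base-n
--
--     Examples:
--         >>> encode_base_n(255, 16)
--         'ff'
--         >>> encode_base_n(42, 36)
--         '16'
--     """
--     if table is None:
--         # Default table: 0-9, a-z
--         table = string.digits + string.ascii_lowercase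
--
--     if not 2 <= n <= len(table):
--         raise ValueError(f"Base must be between 2 and {len(table)}")
--
--     if num == 0:
--         return table[0]
--
--     result = []
--     is_negative = num < 0
--     num = abs(num)
--
--     while num > 0:
--         result.append(table[num % n])
--         num //= n
--
--     if is_negative:
--         result.append("-")
--
--     return "".join(reversed(result))
-- ===== SOURCE B (Python) =====
-- import string
-- from typing import Optional
--
--
-- def encode_base_n(num: int, n: int, table: Optional[str] = None) -> str:
--     if table is None:
--         table = string.digits + string.ascii_lowercase
--
--     if not 2 <= n <= len(table):
--         raise ValueError(f"Base must be between 2 and {len(table)}")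
--
--     m = abs(num)
--     # number of digits: smallest k >= 1 with n ** k > m (so m == 0 gives k == 1)
--     k = 1
--     while n ** k <= m:
--         k += 1
--     digits = "".join(table[(m // n ** i) % n] for i in range(k - 1, -1, -1))
--     return ("-" if num < 0 else "") + digits
-- ===== Notes on version B (the rewrite author's own statement) =====
-- stated objective: alternative
-- what changed: Instead of repeatedly dividing num and reversing an accumulated digit list, B first computes the digit count k and then reads each digit directly as (m // n**i) % n from most significant to least, so there is no mutation of num, no accumulator list, no reversal and no special zero branch (k=1 yields table[0]).
import Mathlib
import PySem

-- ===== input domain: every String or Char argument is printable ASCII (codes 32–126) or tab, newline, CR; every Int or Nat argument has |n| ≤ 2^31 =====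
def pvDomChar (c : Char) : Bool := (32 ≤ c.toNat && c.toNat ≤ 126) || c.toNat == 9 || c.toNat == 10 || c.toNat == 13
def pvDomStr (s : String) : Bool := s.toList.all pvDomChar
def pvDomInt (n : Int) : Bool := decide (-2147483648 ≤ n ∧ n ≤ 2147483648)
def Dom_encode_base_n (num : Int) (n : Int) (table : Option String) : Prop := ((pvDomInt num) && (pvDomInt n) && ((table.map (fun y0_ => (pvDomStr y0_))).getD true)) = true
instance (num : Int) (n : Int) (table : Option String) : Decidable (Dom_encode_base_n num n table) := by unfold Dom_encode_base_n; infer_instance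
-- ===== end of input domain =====

-- B replaces A's divide-accumulate-reverse loop by computing the digit count k first and
-- then reading each digit directly as (m / n^i) % n most-significant-first (alternative
-- decomposition, no speed claim).

-- ===== PORT A =====
def pvDefaultTable : String := "0123456789abcdefghijklmnopqrstuvwxyz"

-- A's while loop: append table[num % n], num //= n, while num > 0 (least-significant first).
-- The 'n ≤ 1' disjunct is only a totality guard; inside Pre_ we have n ≥ 2.
def encLoopA (m : Nat) (n : Nat) (tbl : List Char) : List Char :=
  if m = 0 ∨ n ≤ 1 then []
  else tbl.getD (m % n) ' ' :: encLoopA (m / n) n tbl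
termination_by m
decreasing_by
  rename_i h
  push_neg at h
  exact Nat.div_lt_self (Nat.pos_of_ne_zero h.1) (by omega)

def encode_base_n (num : Int) (n : Int) (table : Option String) : String :=
  let tbl := (table.getD pvDefaultTable).toList
  if num = 0 then String.mk [tbl.getD 0 ' ']   -- table[0]; in range since Pre_ gives 2 ≤ n ≤ len(table)
  else
    let isNeg := num < 0
    let result := encLoopA num.natAbs n.toNat tbl
    let result := if isNeg then result ++ ['-'] else result
    String.mk result.reverse

-- ===== PORT B =====
-- B's k loop: k = 1; while n ** k <= m: k += 1.  The '1 < n' test is only a totality guard.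
def digCountB (m : Nat) (n : Nat) (k : Nat) : Nat :=
  if 1 < n then (if n ^ k ≤ m then digCountB m n (k + 1) else k) else k
termination_by m + 1 - n ^ k
decreasing_by
  rename_i h1 h2
  have : n ^ k < n ^ (k + 1) := Nat.pow_lt_pow_succ h1
  omega

def encode_base_n_alt (num : Int) (n : Int) (table : Option String) : String :=
  let tbl := (table.getD pvDefaultTable).toList
  let m := num.natAbs
  let nn := n.toNat
  let k := digCountB m nn 1
  -- "".join(table[(m // n ** i) % n] for i in range(k - 1, -1, -1))
  let digits := (List.range k).reverse.map (fun i => tbl.getD ((m / nn ^ i) % nn) ' ')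
  String.mk ((if num < 0 then ['-'] else []) ++ digits)

-- ===== PRECONDITION & SPEC =====
-- Pre_ excludes exactly the inputs where A raises ValueError: ¬(2 ≤ n ≤ len(table)).
def Pre_encode_base_n (num : Int) (n : Int) (table : Option String) : Prop :=
  2 ≤ n ∧ n ≤ ((table.getD pvDefaultTable).length : Int)
instance (num : Int) (n : Int) (table : Option String) : Decidable (Pre_encode_base_n num n table) := by unfold Pre_encode_base_n; infer_instance
def pvWitness_encode_base_n : Int × Int × Option String := (255, 16, none)

def Spec_encode_base_n (num : Int) (n : Int) (table : Option String) (out : String) : Prop := out = encode_base_n_alt num n table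
instance (num : Int) (n : Int) (table : Option String) (out : String) : Decidable (Spec_encode_base_n num n table out) := by unfold Spec_encode_base_n; infer_instance

-- ===== CLAIM =====
def Claim_equal_encode_base_n : Prop := ∀ (num : Int) (n : Int) (table : Option String), Dom_encode_base_n num n table → Pre_encode_base_n num n table → Spec_encode_base_n num n table (encode_base_n num n table)

-- ===== LEMMAS AND PROOFS =====

-- digCountB counts k plus the number of digits of m / n^k.
theorem digCountB_eq (tbl : List Char) {n : Nat} (hn : 2 ≤ n) (m k : Nat) :
    digCountB m n k = k + (encLoopA (m / n ^ k) n tbl).length := by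
  fun_induction digCountB m n k with
  | case1 k h1 h2 ih =>
      -- n ^ k ≤ m
      rw [ih]
      have hle : 1 ≤ m / n ^ k := (Nat.one_le_div_iff (pow_pos (by omega : 0 < n) k)).mpr h2
      conv_rhs => rw [encLoopA]
      rw [if_neg (by omega)]
      have hdd : m / n ^ k / n = m / n ^ (k + 1) := by
        rw [Nat.div_div_eq_div_mul, ← pow_succ]
      rw [hdd]
      simp only [List.length_cons]
      omega
  | case2 k h1 h2 =>
      have : m / n ^ k = 0 := Nat.div_eq_of_lt (by omega)
      rw [this, encLoopA]
      simp
  | case3 k h1 => omega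

-- the digit list of A is exactly the map of direct digit extraction over its index range
theorem encLoopA_eq_map {n : Nat} (hn : 2 ≤ n) (tbl : List Char) :
    ∀ m, encLoopA m n tbl
      = (List.range (encLoopA m n tbl).length).map (fun i => tbl.getD ((m / n ^ i) % n) ' ') := by
  intro m
  induction m using Nat.strong_induction_on with
  | _ m ih =>
    by_cases h0 : m = 0
    · rw [h0, encLoopA]; simp
    · rw [encLoopA, if_neg (by omega)]
      have hrec := ih (m / n) (Nat.div_lt_self (Nat.pos_of_ne_zero h0) (by omega))
      simp only [List.length_cons, List.range_succ_eq_map, List.map_cons, List.map_map]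
      congr 1
      · simp
      · rw [hrec]
        simp only [List.length_map, List.length_range]
        congr 1
        funext i
        simp [Function.comp, Nat.div_div_eq_div_mul, pow_succ']

theorem encode_base_n_spec : Claim_equal_encode_base_n := by
  intro num n table _ hpre
  obtain ⟨hn2, _⟩ := hpre
  have hnn : 2 ≤ n.toNat := by omega
  unfold Spec_encode_base_n encode_base_n encode_base_n_alt
  simp only
  set tbl := (table.getD pvDefaultTable).toList with htbl
  by_cases h0 : num = 0
  · subst h0
    rw [if_pos rfl]
    have : digCountB 0 n.toNat 1 = 1 := by
      rw [digCountB_eq tbl hnn]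
      rw [Nat.zero_div, encLoopA]
      simp
    simp [this, List.range_succ, Nat.zero_mod]
  · rw [if_neg h0]
    have hm : num.natAbs ≠ 0 := by
      simpa using h0
    -- digCountB num.natAbs n.toNat 1 = length of A's digit list
    have hk : digCountB num.natAbs n.toNat 1 = (encLoopA num.natAbs n.toNat tbl).length := by
      rw [digCountB_eq tbl hnn]
      conv_rhs => rw [encLoopA, if_neg (by omega)]
      simp [pow_one]
      omega
    rw [hk, List.map_reverse, ← encLoopA_eq_map hnn tbl num.natAbs]
    by_cases hneg : num < 0 <;> simp [hneg, List.reverse_append]
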